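-- pv_equiv track=rewrite | github.com/zlatin-r/Programming-Fundamentals-with-Python | Text Processing - Exercise/winning_ticket.py | check
-- ===== SOURCE A (Python) =====
-- symbols = ('@', '#', '$', '^')
--
-- def check(ticket):
--     if len(ticket) != 20:
--         return "invalid ticket"
--     left_part = ticket[:10]
--     right_part = ticket[10:]
--
--     for match_symbol in symbols:
--         for uninterrupted_match_length in range(10, 5, -1):
--             winning_symbol_rep = match_symbol * uninterrupted_match_length
--             if winning_symbol_rep in left_part and winning_symbol_rep in right_part:
--                 if uninterrupted_match_length == 10:
--                     return f'ticket "{ticket}" - {uninterrupted_match_length}{match_symbol} Jackpot!'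
--                 return f'ticket "{ticket}" - {uninterrupted_match_length}{match_symbol}'
--     return f'ticket "{ticket}" - no match'
-- ===== SOURCE B (Python) =====
-- def longest_run(s, sym):
--     best = cur = 0
--     for ch in s:
--         cur = cur + 1 if ch == sym else 0
--         if cur > best:
--             best = cur
--     return best
--
-- def check(ticket):
--     if len(ticket) != 20:
--         return "invalid ticket"
--     left_part = ticket[:10]
--     right_part = ticket[10:]
--     for sym in ('@', '#', '$', '^'):
--         m = min(longest_run(left_part, sym), longest_run(right_part, sym))
--         if m >= 6:
--             suffix = " Jackpot!" if m == 10 else ""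
--             return f'ticket "{ticket}" - {m}{sym}{suffix}'
--     return f'ticket "{ticket}" - no match'
-- ===== Notes on version B (the rewrite author's own statement) =====
-- stated objective: alternative
-- what changed: B replaces A's descending search that re-tests substring membership of sym*k (k=10..6) in each half by a single left-to-right run-length scan of each half per symbol, returning min(left_run, right_run) when it is at least 6.
import Mathlib
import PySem

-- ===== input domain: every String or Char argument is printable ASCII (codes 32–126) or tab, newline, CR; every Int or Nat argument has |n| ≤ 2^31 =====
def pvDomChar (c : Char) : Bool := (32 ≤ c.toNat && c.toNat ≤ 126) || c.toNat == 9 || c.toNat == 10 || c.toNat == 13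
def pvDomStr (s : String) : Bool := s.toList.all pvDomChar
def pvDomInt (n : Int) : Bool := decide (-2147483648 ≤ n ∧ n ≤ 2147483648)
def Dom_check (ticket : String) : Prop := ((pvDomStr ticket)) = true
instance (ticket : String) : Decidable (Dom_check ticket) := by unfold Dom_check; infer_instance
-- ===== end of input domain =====

-- B replaces A's descending search re-testing sym*k substring membership (k = 10..6) in each half
-- by a single run-length scan of each half per symbol, using min(left_run, right_run); objective: alternative.

-- ===== PORT A =====
-- ticket "{t}" - {k}{c} Jackpot!
def fmtJackpot (t : String) (k : Int) (c : Char) : String :=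
  "ticket \"" ++ t ++ "\" - " ++ PySem.Int.toStr k ++ String.ofList [c] ++ " Jackpot!"
-- ticket "{t}" - {k}{c}
def fmtWin (t : String) (k : Int) (c : Char) : String :=
  "ticket \"" ++ t ++ "\" - " ++ PySem.Int.toStr k ++ String.ofList [c]
-- ticket "{t}" - no match
def fmtNoMatch (t : String) : String :=
  "ticket \"" ++ t ++ "\" - no match"

-- inner loop: for uninterrupted_match_length in range(10, 5, -1)
def innerA (t : String) (c : Char) (left right : List Char) : List Int → Option String
  | [] => none
  | k :: ks =>
    let rep := PySem.List.pyRepeat [c] k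
    if PySem.Chars.isIn rep left && PySem.Chars.isIn rep right then
      some (if k == 10 then fmtJackpot t k c else fmtWin t k c)
    else innerA t c left right ks

-- outer loop: for match_symbol in symbols
def outerA (t : String) (left right : List Char) : List Char → String
  | [] => fmtNoMatch t
  | c :: cs =>
    match innerA t c left right (PySem.List.pyRange 10 5 (-1)) with
    | some s => s
    | none => outerA t left right cs

def check (ticket : String) : String :=
  if PySem.Str.len ticket ≠ 20 then "invalid ticket"
  else
    outerA ticket (PySem.Chars.slice ticket.toList none (some 10))
      (PySem.Chars.slice ticket.toList (some 10) none) ['@', '#', '$', '^']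

-- ===== PORT B =====
-- longest_run: one pass, cur = cur+1 on match else 0, best updated when exceeded
def runStep (c : Char) (p : Nat × Nat) (ch : Char) : Nat × Nat :=
  let cur := if ch == c then p.2 + 1 else 0
  (if cur > p.1 then cur else p.1, cur)

def longestRun (s : List Char) (c : Char) : Nat := (s.foldl (runStep c) (0, 0)).1

def outerB (t : String) (left right : List Char) : List Char → String
  | [] => fmtNoMatch t
  | c :: cs =>
    let m := min (longestRun left c) (longestRun right c)
    if 6 ≤ m then
      let suffix := if m == 10 then " Jackpot!" else ""
      "ticket \"" ++ t ++ "\" - " ++ PySem.Int.toStr (m : Int) ++ String.ofList [c] ++ suffix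
    else outerB t left right cs

def check_alt (ticket : String) : String :=
  if PySem.Str.len ticket ≠ 20 then "invalid ticket"
  else
    outerB ticket (PySem.Chars.slice ticket.toList none (some 10))
      (PySem.Chars.slice ticket.toList (some 10) none) ['@', '#', '$', '^']

-- ===== PRECONDITION & SPEC =====
def Spec_check (ticket : String) (out : String) : Prop := out = check_alt ticket
instance (ticket : String) (out : String) : Decidable (Spec_check ticket out) := by unfold Spec_check; infer_instance

-- ===== CLAIM (what is proved, stated in full; the proofs are below) =====
def Claim_equal_check : Prop := ∀ (ticket : String), Dom_check ticket → Spec_check ticket (check ticket)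

-- ===== LEMMAS AND PROOFS =====

-- length of the maximal all-c prefix
def leadRun (c : Char) : List Char → Nat
  | [] => 0
  | x :: xs => if x = c then leadRun c xs + 1 else 0

-- length of the maximal all-c block anywhere
def maxRun (c : Char) : List Char → Nat
  | [] => 0
  | x :: xs => max (leadRun c (x :: xs)) (maxRun c xs)

theorem leadRun_le_length (c : Char) (s : List Char) : leadRun c s ≤ s.length := by
  induction s with
  | nil => simp [leadRun]
  | cons x xs ih => simp only [leadRun, List.length_cons]; split <;> omega

theorem maxRun_le_length (c : Char) (s : List Char) : maxRun c s ≤ s.length := by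
  induction s with
  | nil => simp [maxRun]
  | cons x xs ih =>
    have := leadRun_le_length c (x :: xs)
    simp only [maxRun, List.length_cons] at *
    omega

theorem leadRun_replicate (c : Char) (r : Nat) : leadRun c (List.replicate r c) = r := by
  induction r with
  | zero => rfl
  | succ n ih => simp [List.replicate_succ, leadRun, ih]

theorem leadRun_append (c : Char) (a b : List Char) :
    leadRun c (a ++ b) = if leadRun c a = a.length then a.length + leadRun c b else leadRun c a := by
  induction a with
  | nil => simp [leadRun]
  | cons x xs ih =>
    by_cases hx : x = c
    · simp only [List.cons_append, leadRun, hx, ih, List.length_cons]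
      split_ifs with h1 h2 h3 <;> omega
    · simp [leadRun, hx]

theorem replicate_prefix_iff (c : Char) (s : List Char) (k : Nat) :
    List.replicate k c <+: s ↔ k ≤ leadRun c s := by
  induction s generalizing k with
  | nil =>
    cases k with
    | zero => simp [leadRun]
    | succ n => simp [List.replicate_succ, leadRun]
  | cons x xs ih =>
    cases k with
    | zero => simp [List.nil_prefix]
    | succ n =>
      simp only [List.replicate_succ, List.cons_prefix_cons, leadRun]
      by_cases hx : x = c
      · subst hx; rw [ih]; simp
      · simp [hx, Ne.symm hx]

theorem replicate_infix_iff (c : Char) (s : List Char) (k : Nat) :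
    List.replicate k c <:+: s ↔ k ≤ maxRun c s := by
  induction s generalizing k with
  | nil =>
    cases k with
    | zero => simp [maxRun]
    | succ n => simp [List.replicate_succ, maxRun]
  | cons x xs ih =>
    rw [List.infix_cons_iff, replicate_prefix_iff, ih]
    simp only [maxRun]
    constructor
    · rintro (h | h) <;> omega
    · intro h
      rcases Nat.le_total (leadRun c (x :: xs)) (maxRun c xs) with hle | hle <;> omega

theorem isIn_replicate_iff (c : Char) (s : List Char) (k : Nat) :
    PySem.Chars.isIn (List.replicate k c) s = true ↔ k ≤ maxRun c s := by
  rw [PySem.Chars.isIn_iff_infix, replicate_infix_iff]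

theorem leadRun_snoc_ne (c x : Char) (hx : x ≠ c) (w u : List Char) :
    leadRun c (w ++ [x] ++ u) = leadRun c w := by
  rw [List.append_assoc, leadRun_append]
  have h0 : leadRun c ([x] ++ u) = 0 := by simp [leadRun, hx]
  rw [h0]
  split_ifs with h <;> omega

theorem maxRun_replicate_append_cons (c x : Char) (hx : x ≠ c) (r : Nat) (xs : List Char) :
    maxRun c (List.replicate r c ++ x :: xs) = max r (maxRun c xs) := by
  induction r with
  | zero => simp [maxRun, leadRun, hx]
  | succ n ih =>
    have hlead : leadRun c (List.replicate n c ++ x :: xs) = n := by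
      rw [leadRun_append, leadRun_replicate]
      simp [leadRun, hx]
    rw [List.replicate_succ, List.cons_append]
    simp [maxRun, leadRun, hlead, ih]
    omega

theorem foldl_runStep (c : Char) (s : List Char) :
    ∀ b r : Nat, r ≤ b →
      s.foldl (runStep c) (b, r) =
        (max b (maxRun c (List.replicate r c ++ s)), leadRun c (List.replicate r c ++ s).reverse) := by
  induction s with
  | nil =>
    intro b r hrb
    simp only [List.foldl_nil, List.append_nil]
    rw [List.reverse_replicate, leadRun_replicate]
    have h1 : maxRun c (List.replicate r c) = r := by
      have h2 := (replicate_infix_iff c (List.replicate r c) r).mp (List.infix_refl _)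
      have h3 := maxRun_le_length c (List.replicate r c)
      simp only [List.length_replicate] at h3
      omega
    rw [h1]
    simp [Nat.max_eq_left hrb]
  | cons x xs ih =>
    intro b r hrb
    by_cases hx : x = c
    · subst hx
      have hstep : runStep x (b, r) x = (max b (r + 1), r + 1) := by
        simp [runStep, Prod.ext_iff]
        split_ifs <;> omega
      have hrepl : List.replicate r x ++ x :: xs = List.replicate (r + 1) x ++ xs := by
        rw [List.replicate_succ']
        simp
      rw [List.foldl_cons, hstep, ih (max b (r + 1)) (r + 1) (le_max_right _ _), hrepl]
      have hm : r + 1 ≤ maxRun x (List.replicate (r + 1) x ++ xs) := by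
        rw [← replicate_infix_iff]
        exact (List.prefix_append _ _).isInfix
      simp only [Prod.mk.injEq]
      exact ⟨by omega, trivial⟩
    · have hstep : runStep c (b, r) x = (b, 0) := by
        simp [runStep, hx]
      rw [List.foldl_cons, hstep, ih b 0 (Nat.zero_le b)]
      simp only [List.replicate_zero, List.nil_append]
      rw [maxRun_replicate_append_cons c x hx]
      have hlead : leadRun c (List.replicate r c ++ x :: xs).reverse = leadRun c xs.reverse := by
        rw [List.reverse_append, List.reverse_replicate, List.reverse_cons,
          leadRun_snoc_ne c x hx]
      rw [hlead]
      simp only [Prod.mk.injEq]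
      exact ⟨by omega, trivial⟩

theorem longestRun_eq_maxRun (s : List Char) (c : Char) : longestRun s c = maxRun c s := by
  unfold longestRun
  rw [foldl_runStep c s 0 0 le_rfl]
  simp

-- the inner descending loop finds exactly min(maxRun left, maxRun right) when that is ≥ 6
theorem innerA_eq (t : String) (c : Char) (left right : List Char)
    (hL : left.length = 10) :
    innerA t c left right (PySem.List.pyRange 10 5 (-1)) =
      (if 6 ≤ min (maxRun c left) (maxRun c right) then
        some (if ((min (maxRun c left) (maxRun c right) : Nat) : Int) == 10
          then fmtJackpot t ((min (maxRun c left) (maxRun c right) : Nat) : Int) c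
          else fmtWin t ((min (maxRun c left) (maxRun c right) : Nat) : Int) c)
      else none) := by
  have hrange : PySem.List.pyRange 10 5 (-1) = [10, 9, 8, 7, 6] := by decide
  have hmL : maxRun c left ≤ 10 := hL ▸ maxRun_le_length c left
  set m := min (maxRun c left) (maxRun c right) with hm
  have hm10 : m ≤ 10 := le_trans (min_le_left _ _) hmL
  have hcond : ∀ k : Nat, (PySem.Chars.isIn (List.replicate k c) left
      && PySem.Chars.isIn (List.replicate k c) right) = decide (k ≤ m) := by
    intro k
    by_cases h : k ≤ m
    · have h1 : k ≤ maxRun c left := le_trans h (min_le_left _ _)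
      have h2 : k ≤ maxRun c right := le_trans h (min_le_right _ _)
      rw [(isIn_replicate_iff c left k).mpr h1, (isIn_replicate_iff c right k).mpr h2]
      simp [h]
    · have hor : ¬ (k ≤ maxRun c left) ∨ ¬ (k ≤ maxRun c right) := by omega
      rcases hor with h1 | h1
      · have h2 := (isIn_replicate_iff c left k).not.mpr h1
        simp only [Bool.not_eq_true] at h2
        simp [h2, h]
      · have h2 := (isIn_replicate_iff c right k).not.mpr h1
        simp only [Bool.not_eq_true] at h2
        simp [h2, h]
  have hrep : ∀ k : Int, PySem.List.pyRepeat [c] k = List.replicate k.toNat c :=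
    fun k => PySem.List.pyRepeat_singleton c k
  rw [hrange]
  simp only [innerA, hrep]
  rw [show ((10 : Int).toNat) = 10 from rfl, show ((9 : Int).toNat) = 9 from rfl,
    show ((8 : Int).toNat) = 8 from rfl, show ((7 : Int).toNat) = 7 from rfl,
    show ((6 : Int).toNat) = 6 from rfl]
  rw [hcond 10, hcond 9, hcond 8, hcond 7, hcond 6]
  interval_cases m <;> simp

theorem outer_eq (t : String) (left right : List Char)
    (hL : left.length = 10) :
    ∀ cs : List Char, outerA t left right cs = outerB t left right cs := by
  intro cs
  induction cs with
  | nil => rfl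
  | cons c cs ih =>
    rw [outerA, outerB, innerA_eq t c left right hL,
      longestRun_eq_maxRun left c, longestRun_eq_maxRun right c]
    generalize min (maxRun c left) (maxRun c right) = m
    by_cases h6 : 6 ≤ m
    · rw [if_pos h6, if_pos h6]
      by_cases h10 : m = 10
      · subst h10
        simp [fmtJackpot]
      · have hb1 : (((m : Nat) : Int) == 10) = false := by
          simp
          omega
        have hb2 : (m == 10) = false := by simp [h10]
        simp [hb1, hb2, fmtWin]
    · rw [if_neg h6, if_neg h6]
      exact ih

-- ===== VERDICT (by name: the statement is the Claim_ definition above) =====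
theorem check_spec : Claim_equal_check := by
  intro ticket _
  unfold Spec_check check check_alt
  by_cases hlen : PySem.Str.len ticket ≠ 20
  · rw [if_pos hlen, if_pos hlen]
  · rw [if_neg hlen, if_neg hlen]
    have h20 : ticket.toList.length = 20 := by
      have h := not_not.mp hlen
      simp [PySem.Str.len_eq] at h
      exact_mod_cast h
    have hL : (PySem.Chars.slice ticket.toList none (some 10)).length = 10 := by
      rw [PySem.Chars.slice_eq_listSlice, PySem.List.slice_to] <;> simp [h20]
    exact outer_eq ticket _ _ hL ['@', '#', '$', '^']
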